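-- pv_equiv track=rewrite | github.com/ZoeChengYu/python | OCT2615.py | find_Duplicate_Values
-- ===== SOURCE A (Python) =====
-- def find_Duplicate_Values(data):
--     duplicate_datd=[]
--     for i in range(len(data)-1):
--             if data[i]==data[i+1]:
--                 duplicate_datd=duplicate_datd+[data[i]]
--
--     duplicate_datd=list(set(duplicate_datd))
--     duplicate_datd.sort(reverse=True)
--     return duplicate_datd
-- ===== SOURCE B (Python) =====
-- def find_Duplicate_Values(data):
--     # Walk maximal runs of equal adjacent elements; a run of length >= 2
--     # contributes its value.  Returns the distinct values sorted descending,
--     # exactly like the pairwise-index scan.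
--     dups = set()
--     i, n = 0, len(data)
--     while i < n:
--         j = i + 1
--         while j < n and data[j] == data[i]:
--             j += 1
--         if j - i >= 2:
--             dups.add(data[i])
--         i = j
--     return sorted(dups, reverse=True)
-- ===== Notes on version B (the rewrite author's own statement) =====
-- stated objective: faster
-- what changed: B walks maximal runs of equal neighbours with a two-pointer scan, adding each run's key once to a set, instead of A's index-pair scan that rebuilds the duplicates list by quadratic concatenation before dedup-and-sort.
import Mathlib
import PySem

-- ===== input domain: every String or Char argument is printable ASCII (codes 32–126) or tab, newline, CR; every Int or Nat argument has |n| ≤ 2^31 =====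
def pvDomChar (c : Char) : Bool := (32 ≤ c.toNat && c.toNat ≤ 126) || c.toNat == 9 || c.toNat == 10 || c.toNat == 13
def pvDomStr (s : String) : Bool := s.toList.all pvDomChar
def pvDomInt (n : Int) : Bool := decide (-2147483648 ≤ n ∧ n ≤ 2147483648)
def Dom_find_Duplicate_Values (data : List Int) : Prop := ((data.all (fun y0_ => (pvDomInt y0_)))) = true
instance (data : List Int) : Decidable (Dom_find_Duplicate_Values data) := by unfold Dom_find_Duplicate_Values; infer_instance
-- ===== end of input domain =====

-- B replaces A's index-pair scan (building the list by repeated concatenation,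
-- then list(set(..)).sort) with a two-pointer walk over maximal runs of equal
-- neighbours that adds each run's key once to a set; same sorted-descending result.

-- ===== PORT A =====
def find_Duplicate_Values (data : List Int) : List Int :=
  let dup := (PySem.List.pyRange 0 ((data.length : Int) - 1) 1).foldl
    (fun acc i =>
      if PySem.List.pyGetD data i 0 = PySem.List.pyGetD data (i + 1) 0 then
        acc ++ [PySem.List.pyGetD data i 0]
      else acc) []
  PySem.List.sorted (PySem.Set.ofList dup) (fun x => x) true

-- ===== PORT B =====
-- the inner `while j < n and data[j] == data[i]` loop: consume the run of x, return (run length, remainder)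
def pvTakeRun (x : Int) : List Int → Nat × List Int
  | [] => (0, [])
  | y :: t => if y = x then ((pvTakeRun x t).1 + 1, (pvTakeRun x t).2) else (0, y :: t)

theorem pvTakeRun_snd_length (x : Int) (l : List Int) : (pvTakeRun x l).2.length ≤ l.length := by
  induction l with
  | nil => simp [pvTakeRun]
  | cons y t ih => by_cases h : y = x <;> simp [pvTakeRun, h] <;> omega

-- the outer `while i < n` loop
def pvCollect : List Int → PySem.Set Int → PySem.Set Int
  | [], s => s
  | x :: rest, s =>
      pvCollect (pvTakeRun x rest).2
        (if 1 ≤ (pvTakeRun x rest).1 then PySem.Set.add s x else s)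
  termination_by l _ => l.length
  decreasing_by
    have := pvTakeRun_snd_length x rest
    simp; omega

def find_Duplicate_Values_alt (data : List Int) : List Int :=
  PySem.List.sorted (pvCollect data PySem.Set.empty) (fun x => x) true

-- ===== PRECONDITION & SPEC =====
def Spec_find_Duplicate_Values (data : List Int) (out : List Int) : Prop := out = find_Duplicate_Values_alt data
instance (data : List Int) (out : List Int) : Decidable (Spec_find_Duplicate_Values data out) := by unfold Spec_find_Duplicate_Values; infer_instance

-- ===== CLAIM (what is proved, stated in full; the proofs are below) =====
def Claim_equal_find_Duplicate_Values : Prop := ∀ (data : List Int), Dom_find_Duplicate_Values data → Spec_find_Duplicate_Values data (find_Duplicate_Values data)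

-- ===== LEMMAS AND PROOFS =====

-- membership in a foldl of this shape
theorem mem_foldl_append_if {P : Int → Prop} [DecidablePred P] (f : Int → Int)
    (l : List Int) (acc : List Int) (y : Int) :
    y ∈ l.foldl (fun acc i => if P i then acc ++ [f i] else acc) acc ↔
      y ∈ acc ∨ ∃ i ∈ l, P i ∧ f i = y := by
  induction l generalizing acc with
  | nil => simp
  | cons a t ih =>
      simp only [List.foldl_cons, ih, List.mem_cons]
      by_cases h : P a <;> simp [h] <;> tauto

theorem pyGetD_getElem? (data : List Int) (i : Int) (h0 : 0 ≤ i) (h1 : i < (data.length : Int)) :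
    data[i.toNat]? = some (PySem.List.pyGetD data i 0) := by
  rw [PySem.List.pyGetD_eq_getElem data 0 h0 h1, List.getElem?_eq_getElem]

-- (y, y) occurs among adjacent pairs, index form
theorem mem_zip_tail_iff (l : List Int) (y : Int) :
    (y, y) ∈ l.zip l.tail ↔ ∃ j : Nat, j + 1 < l.length ∧ l[j]? = some y ∧ l[j + 1]? = some y := by
  induction l with
  | nil => simp
  | cons a t ih =>
      cases t with
      | nil => simp
      | cons b t' =>
          constructor
          · intro h
            rcases List.mem_cons.1 h with h | h
            · rw [Prod.mk.injEq] at h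
              obtain ⟨h1, h2⟩ := h
              exact ⟨0, by simp, by simp [h1.symm], by simp [h2.symm]⟩
            · rcases ih.1 (by simpa using h) with ⟨j, hj, h1, h2⟩
              refine ⟨j + 1, ?_, by simpa using h1, by simpa using h2⟩
              simp only [List.length_cons] at hj ⊢
              omega
          · rintro ⟨j, hj, h1, h2⟩
            cases j with
            | zero =>
                simp only [List.getElem?_cons_zero, Option.some_inj] at h1
                simp only [List.getElem?_cons_succ, List.getElem?_cons_zero, Option.some_inj] at h2
                exact List.mem_cons.2 (Or.inl (by rw [Prod.mk.injEq]; exact ⟨h1.symm, h2.symm⟩))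
            | succ j' =>
                refine List.mem_cons_of_mem _ (by
                  have : (y, y) ∈ (b :: t').zip (b :: t').tail := by
                    refine ih.2 ⟨j', ?_, by simpa using h1, by simpa using h2⟩
                    simp only [List.length_cons] at hj ⊢
                    omega
                  simpa using this)

theorem pvTakeRun_decomp (x : Int) (l : List Int) :
    l = List.replicate (pvTakeRun x l).1 x ++ (pvTakeRun x l).2 ∧
      (∀ y ∈ (pvTakeRun x l).2.head?, y ≠ x) := by
  induction l with
  | nil => simp [pvTakeRun]
  | cons a t ih =>
      by_cases h : a = x
      · subst h
        simp only [pvTakeRun, if_true]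
        exact ⟨by simpa [List.replicate_succ] using ih.1, ih.2⟩
      · simp [pvTakeRun, h]

theorem mem_zip_run (x y : Int) (k : Nat) (tail : List Int)
    (htail : ∀ z ∈ tail.head?, z ≠ x) :
    (y, y) ∈ (x :: (List.replicate k x ++ tail)).zip (List.replicate k x ++ tail) ↔
      (1 ≤ k ∧ y = x) ∨ (y, y) ∈ tail.zip tail.tail := by
  induction k with
  | zero =>
      simp only [List.replicate_zero, List.nil_append]
      cases tail with
      | nil => simp
      | cons b t' =>
          have hb : b ≠ x := htail b (by simp)
          constructor
          · intro h
            rcases List.mem_cons.1 h with h | h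
            · rw [Prod.mk.injEq] at h
              exact absurd (h.1.symm.trans h.2).symm hb
            · exact Or.inr (by simpa using h)
          · rintro (⟨h, _⟩ | h)
            · omega
            · exact List.mem_cons_of_mem _ (by simpa using h)
  | succ k' ih =>
      simp only [List.replicate_succ, List.cons_append, List.zip_cons_cons, List.mem_cons,
        Prod.mk.injEq]
      rw [show ((x :: (List.replicate k' x ++ tail)).zip (List.replicate k' x ++ tail)) =
        ((x :: (List.replicate k' x ++ tail)).zip (List.replicate k' x ++ tail)) from rfl]
      constructor
      · rintro (⟨h, _⟩ | h)
        · exact Or.inl ⟨by omega, h⟩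
        · rcases ih.1 h with ⟨_, h⟩ | h
          · exact Or.inl ⟨by omega, h⟩
          · exact Or.inr h
      · rintro (⟨_, h⟩ | h)
        · exact Or.inl ⟨h, h⟩
        · exact Or.inr (ih.2 (Or.inr h))

theorem mem_pvCollect (l : List Int) (s : PySem.Set Int) (y : Int) :
    y ∈ pvCollect l s ↔ y ∈ s ∨ (y, y) ∈ l.zip l.tail := by
  induction l, s using pvCollect.induct with
  | case1 s => simp [pvCollect]
  | case2 x rest s ih =>
      obtain ⟨hdec, hhd⟩ := pvTakeRun_decomp x rest
      simp only [dite_eq_ite] at ih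
      rw [pvCollect, ih]
      have hz : (y, y) ∈ (x :: rest).zip rest ↔
          (1 ≤ (pvTakeRun x rest).1 ∧ y = x) ∨
            (y, y) ∈ (pvTakeRun x rest).2.zip (pvTakeRun x rest).2.tail := by
        conv_lhs => rw [hdec]
        exact mem_zip_run x y _ _ hhd
      simp only [List.tail_cons, hz]
      by_cases h1 : 1 ≤ (pvTakeRun x rest).1
      · simp only [if_pos h1, PySem.Set.mem_add]
        tauto
      · simp only [if_neg h1]
        tauto

theorem nodup_set_add (s : PySem.Set Int) (x : Int) (h : s.Nodup) : (PySem.Set.add s x).Nodup := by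
  by_cases hc : x ∈ s
  · simpa [PySem.Set.add, PySem.Set.contains, hc] using h
  · simp [PySem.Set.add, PySem.Set.contains, hc, List.Nodup.append, h]

theorem nodup_pvCollect (l : List Int) (s : PySem.Set Int) : s.Nodup → (pvCollect l s).Nodup := by
  induction l, s using pvCollect.induct with
  | case1 s => intro h; simpa [pvCollect] using h
  | case2 x rest s ih =>
      intro h
      simp only [dite_eq_ite] at ih
      rw [pvCollect]
      apply ih
      split
      · exact nodup_set_add s x h
      · exact h

theorem collectedA_mem (data : List Int) (y : Int) :
    y ∈ (PySem.List.pyRange 0 ((data.length : Int) - 1) 1).foldl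
        (fun acc i =>
          if PySem.List.pyGetD data i 0 = PySem.List.pyGetD data (i + 1) 0 then
            acc ++ [PySem.List.pyGetD data i 0]
          else acc) [] ↔
      (y, y) ∈ data.zip data.tail := by
  rw [mem_foldl_append_if (P := fun i => PySem.List.pyGetD data i 0 = PySem.List.pyGetD data (i + 1) 0)]
  rw [mem_zip_tail_iff]
  simp only [List.not_mem_nil, false_or, PySem.List.mem_pyRange_one]
  constructor
  · rintro ⟨i, ⟨h0, hlt⟩, heq, hy⟩
    refine ⟨i.toNat, by omega, ?_, ?_⟩
    · rw [pyGetD_getElem? data i h0 (by omega), hy]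
    · have e : (i + 1).toNat = i.toNat + 1 := by omega
      rw [← e, pyGetD_getElem? data (i + 1) (by omega) (by omega), ← heq, hy]
  · rintro ⟨j, hj, h1, h2⟩
    have e1 : ((j : Int)).toNat = j := by omega
    have e2 : ((j : Int) + 1).toNat = j + 1 := by omega
    have v1 : PySem.List.pyGetD data (j : Int) 0 = y := by
      have := pyGetD_getElem? data (j : Int) (by omega) (by omega)
      rw [e1, h1] at this
      exact (Option.some_inj.1 this).symm
    have v2 : PySem.List.pyGetD data ((j : Int) + 1) 0 = y := by
      have := pyGetD_getElem? data ((j : Int) + 1) (by omega) (by omega)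
      rw [e2, h2] at this
      exact (Option.some_inj.1 this).symm
    exact ⟨(j : Int), ⟨by omega, by omega⟩, by rw [v1, v2], v1⟩

-- ===== VERDICT (by name: the statement is the Claim_ definition above) =====
theorem find_Duplicate_Values_spec : Claim_equal_find_Duplicate_Values := by
  intro data _
  unfold Spec_find_Duplicate_Values find_Duplicate_Values find_Duplicate_Values_alt
  set sA := PySem.Set.ofList ((PySem.List.pyRange 0 ((data.length : Int) - 1) 1).foldl
    (fun acc i =>
      if PySem.List.pyGetD data i 0 = PySem.List.pyGetD data (i + 1) 0 then
        acc ++ [PySem.List.pyGetD data i 0]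
      else acc) []) with hsA
  set sB := pvCollect data PySem.Set.empty with hsB
  have hAn : sA.Nodup := PySem.Set.nodup_ofList _
  have hBn : sB.Nodup := nodup_pvCollect _ _ (by simp [PySem.Set.empty])
  have hmem : ∀ y, y ∈ sA ↔ y ∈ sB := by
    intro y
    rw [hsA, PySem.Set.mem_ofList, collectedA_mem, hsB, mem_pvCollect]
    simp [PySem.Set.empty]
  have hperm : sA.Perm sB := (List.perm_ext_iff_of_nodup hAn hBn).2 hmem
  apply PySem.List.sorted_rev_eq_of_perm_of_pairwise_gt
  · exact (PySem.List.sorted_perm _ _ _).trans hperm.symm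
  · have hge := PySem.List.sorted_pairwise_rev sB (fun x => x)
    have hnd : (PySem.List.sorted sB (fun x => x) true).Nodup :=
      (PySem.List.sorted_perm _ _ _).nodup_iff.2 hBn
    have := List.Pairwise.and hge hnd
    exact this.imp (fun h => lt_of_le_of_ne h.1 (Ne.symm h.2))
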